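-- pv_equiv track=rewrite | github.com/TC407-api/local-events-newsletter-printer | servers/event_mcp/sources/url_validator.py | _domain_matches_whitelist
-- ===== SOURCE A (Python) =====
-- def _domain_matches_whitelist(hostname: str, allowed_domains: set[str]) -> bool:
--     """Check if hostname matches any allowed domain (supports wildcards)."""
--     hostname = hostname.lower()
--
--     for domain in allowed_domains:
--         domain = domain.lower()
--
--         # Exact match
--         if hostname == domain:
--             return True
--
--         # Subdomain match (e.g., "www.example.com" matches "example.com")
--         if hostname.endswith("." + domain):
--             return True
--
--     return False
-- ===== SOURCE B (Python) =====
-- def _domain_matches_whitelist(hostname: str, allowed_domains: set[str]) -> bool: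
--     """Check if hostname matches any allowed domain (supports wildcards)."""
--     h = hostname.lower()
--     allowed = {d.lower() for d in allowed_domains}
--     if h in allowed:
--         return True
--     return any(h[i + 1:] in allowed for i, c in enumerate(h) if c == '.')
-- ===== Notes on version B (the rewrite author's own statement) =====
-- stated objective: alternative
-- what changed: Instead of scanning every allowed domain and testing equality/endswith against the hostname, B builds one lowercased set of the allowed domains and iterates over the hostname's own dot-suffix candidates (the full hostname plus each substring after a '.'), answering by set membership.
import Mathlib
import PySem

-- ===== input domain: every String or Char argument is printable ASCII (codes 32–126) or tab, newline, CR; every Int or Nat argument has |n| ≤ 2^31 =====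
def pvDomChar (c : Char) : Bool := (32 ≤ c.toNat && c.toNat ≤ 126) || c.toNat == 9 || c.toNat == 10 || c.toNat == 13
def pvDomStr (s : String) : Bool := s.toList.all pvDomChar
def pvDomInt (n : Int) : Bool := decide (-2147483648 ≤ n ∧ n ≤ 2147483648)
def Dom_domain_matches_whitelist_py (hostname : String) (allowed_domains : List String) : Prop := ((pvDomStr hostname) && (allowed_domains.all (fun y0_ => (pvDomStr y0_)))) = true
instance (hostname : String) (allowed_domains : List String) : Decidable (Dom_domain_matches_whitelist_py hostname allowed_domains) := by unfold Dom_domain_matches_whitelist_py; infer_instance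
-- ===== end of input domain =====

-- B replaces A's scan over the allowed domains (equality / endswith per domain) by one
-- lowercased membership set queried with the hostname's dot-suffix candidates (objective: alternative).

-- ===== PORT A =====
-- the for-loop over allowed_domains with its two early returns
def pvALoop (h : List Char) : List String → Bool
  | [] => false
  | d :: rest =>
    let dl := PySem.Chars.lower d.toList
    if h = dl then true
    else if PySem.Chars.endswith h ('.' :: dl) then true
    else pvALoop h rest

def domain_matches_whitelist_py (hostname : String) (allowed_domains : List String) : Bool :=
  pvALoop (PySem.Chars.lower hostname.toList) allowed_domains

-- ===== PORT B =====
-- every h[i+1:] for an index i with h[i] == '.'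
def pvDotSuffixes : List Char → List (List Char)
  | [] => []
  | c :: t => (if c = '.' then [t] else []) ++ pvDotSuffixes t

def domain_matches_whitelist_py_alt (hostname : String) (allowed_domains : List String) : Bool :=
  let h := PySem.Chars.lower hostname.toList
  let allowed : PySem.Set (List Char) :=
    PySem.Set.ofList (allowed_domains.map (fun d => PySem.Chars.lower d.toList))
  if PySem.Set.contains allowed h then true
  else (pvDotSuffixes h).any (fun c => PySem.Set.contains allowed c)

-- ===== PRECONDITION & SPEC =====
def Spec_domain_matches_whitelist_py (hostname : String) (allowed_domains : List String) (out : Bool) : Prop := out = domain_matches_whitelist_py_alt hostname allowed_domains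
instance (hostname : String) (allowed_domains : List String) (out : Bool) : Decidable (Spec_domain_matches_whitelist_py hostname allowed_domains out) := by unfold Spec_domain_matches_whitelist_py; infer_instance

-- ===== CLAIM (what is proved, stated in full; the proofs are below) =====
def Claim_equal_domain_matches_whitelist_py : Prop := ∀ (hostname : String) (allowed_domains : List String), Dom_domain_matches_whitelist_py hostname allowed_domains → Spec_domain_matches_whitelist_py hostname allowed_domains (domain_matches_whitelist_py hostname allowed_domains)

-- ===== LEMMAS AND PROOFS =====

-- A's loop is an 'any' over the domains
theorem pvALoop_eq_any (h : List Char) (l : List String) :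
    pvALoop h l
      = l.any (fun d =>
          decide (h = PySem.Chars.lower d.toList)
            || PySem.Chars.endswith h ('.' :: PySem.Chars.lower d.toList)) := by
  induction l with
  | nil => rfl
  | cons d rest ih =>
    simp only [pvALoop, List.any_cons, ih]
    by_cases h1 : h = PySem.Chars.lower d.toList <;>
      by_cases h2 : PySem.Chars.endswith h ('.' :: PySem.Chars.lower d.toList) = true <;>
      simp [h1, h2]

-- which lists pvDotSuffixes collects: exactly the suffixes of h preceded by '.'
theorem mem_pvDotSuffixes (h x : List Char) :
    x ∈ pvDotSuffixes h ↔ ('.' :: x) <:+ h := by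
  induction h with
  | nil => simp [pvDotSuffixes]
  | cons c t ih =>
    simp only [pvDotSuffixes, List.mem_append, ih, List.suffix_cons_iff]
    constructor
    · rintro (hx | hx)
      · split at hx <;> simp_all
      · exact Or.inr hx
    · rintro (hx | hx)
      · cases hx; simp
      · exact Or.inr hx

theorem both_iff (h : List Char) (l : List String)
    (cand : PySem.Set (List Char))
    (hc : ∀ x, PySem.Set.contains cand x = true ↔
        ∃ d ∈ l, x = PySem.Chars.lower d.toList) :
    (pvALoop h l = true ↔
      (PySem.Set.contains cand h = true ∨
        (pvDotSuffixes h).any (fun c => PySem.Set.contains cand c) = true)) := by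
  rw [pvALoop_eq_any]
  simp only [List.any_eq_true, hc, mem_pvDotSuffixes, Bool.or_eq_true, decide_eq_true_eq,
    PySem.Chars.endswith_iff]
  constructor
  · rintro ⟨d, hd, heq | hsuf⟩
    · exact Or.inl ⟨d, hd, heq⟩
    · exact Or.inr ⟨_, hsuf, d, hd, rfl⟩
  · rintro (⟨d, hd, heq⟩ | ⟨c, hsuf, d, hd, rfl⟩)
    · exact ⟨d, hd, Or.inl heq⟩
    · exact ⟨d, hd, Or.inr hsuf⟩

-- ===== VERDICT (by name: the statement is the Claim_ definition above) =====
theorem domain_matches_whitelist_py_spec : Claim_equal_domain_matches_whitelist_py := by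
  intro hostname allowed_domains _
  unfold Spec_domain_matches_whitelist_py domain_matches_whitelist_py domain_matches_whitelist_py_alt
  set h := PySem.Chars.lower hostname.toList with hh
  set cand := PySem.Set.ofList (allowed_domains.map (fun d => PySem.Chars.lower d.toList)) with hcand
  have hc : ∀ x, PySem.Set.contains cand x = true ↔
      ∃ d ∈ allowed_domains, x = PySem.Chars.lower d.toList := by
    intro x
    simp [hcand, PySem.Set.contains, PySem.Set.mem_ofList, eq_comm]
  have hmain := both_iff h allowed_domains cand hc
  have halt : (if PySem.Set.contains cand h then true
        else (pvDotSuffixes h).any (fun c => PySem.Set.contains cand c)) = true ↔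
      (PySem.Set.contains cand h = true ∨
        (pvDotSuffixes h).any (fun c => PySem.Set.contains cand c) = true) := by
    cases hcH : PySem.Set.contains cand h <;> simp_all
  rw [Bool.eq_iff_iff, hmain, halt]
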